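-- pv_equiv track=rewrite | github.com/rf972/caerus-dike | benchmark/tpch/format_csv.py | isTestBreak
-- ===== SOURCE A (Python) =====
-- def isTestBreak(line):
--     tests = ["--workers 1 --test tblHdfs \n",
--              "--workers 1 --test tblHdfs -p 1 \n",
--              "--workers 4 --test tblHdfs \n",
--              "--workers 6 --test tblHdfs \n",
--              "--workers 1 --test tblPartS3 \n",
--              "--workers 4 --test tblPartS3 \n",
--              "--workers 6 --test tblPartS3 \n",
--              "--workers 1 --test tblS3 -p 1 \n" ]
--     for test in tests:
--         if test in line.replace("--check", ""):
--             return True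
--     return False
-- ===== SOURCE B (Python) =====
-- def isTestBreak(line):
--     tests = ("--workers 1 --test tblHdfs \n",
--              "--workers 1 --test tblHdfs -p 1 \n",
--              "--workers 4 --test tblHdfs \n",
--              "--workers 6 --test tblHdfs \n",
--              "--workers 1 --test tblPartS3 \n",
--              "--workers 4 --test tblPartS3 \n",
--              "--workers 6 --test tblPartS3 \n",
--              "--workers 1 --test tblS3 -p 1 \n")
--     s = line.replace("--check", "")
--     # single left-to-right scan: at each position try all 8 markers at once
--     return any(s.startswith(tests, i) for i in range(len(s) + 1))
-- ===== Notes on version B (the rewrite author's own statement) =====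
-- stated objective: alternative
-- what changed: A loops over the 8 markers, doing a separate full substring scan of the cleaned line for each; B does one left-to-right pass over the positions of the cleaned line, testing all 8 markers at each position with a single tuple startswith.
import Mathlib
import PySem

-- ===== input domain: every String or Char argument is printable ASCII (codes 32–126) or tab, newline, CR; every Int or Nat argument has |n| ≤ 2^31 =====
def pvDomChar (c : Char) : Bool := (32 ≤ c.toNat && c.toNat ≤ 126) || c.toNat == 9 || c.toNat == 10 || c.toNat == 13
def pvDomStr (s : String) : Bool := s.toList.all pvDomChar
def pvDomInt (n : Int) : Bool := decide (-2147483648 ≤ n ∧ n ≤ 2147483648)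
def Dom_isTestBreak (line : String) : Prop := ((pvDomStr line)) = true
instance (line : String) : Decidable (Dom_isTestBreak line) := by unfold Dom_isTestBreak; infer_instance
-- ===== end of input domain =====

-- B replaces A's marker-by-marker substring scans with one position-by-position scan
-- of the cleaned line, trying all 8 markers at each position (objective: alternative).

-- ===== PORT A =====
def pvTestsA : List String :=
  ["--workers 1 --test tblHdfs \n",
   "--workers 1 --test tblHdfs -p 1 \n",
   "--workers 4 --test tblHdfs \n",
   "--workers 6 --test tblHdfs \n",
   "--workers 1 --test tblPartS3 \n",
   "--workers 4 --test tblPartS3 \n",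
   "--workers 6 --test tblPartS3 \n",
   "--workers 1 --test tblS3 -p 1 \n"]

-- A's loop with early return True
def pvCheckTests (s : List Char) : List String → Bool
  | [] => false
  | t :: ts => if PySem.Chars.isIn t.toList s then true else pvCheckTests s ts

def isTestBreak (line : String) : Bool :=
  pvCheckTests (PySem.Chars.replace line.toList "--check".toList []) pvTestsA

-- ===== PORT B =====
-- (B uses the same literal marker list pvTestsA; both Pythons carry the identical literal)
-- s.startswith(t, i) for 0 ≤ i equals s[i:].startswith(t); ported via slice + startswith (exact here)
def isTestBreak_alt (line : String) : Bool :=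
  let s := PySem.Chars.replace line.toList "--check".toList []
  (PySem.List.pyRange 0 ((s.length : Int) + 1) 1).any (fun i =>
    pvTestsA.any (fun t => PySem.Chars.startswith (PySem.Chars.slice s (some i) none) t.toList))

-- ===== PRECONDITION & SPEC =====
def Spec_isTestBreak (line : String) (out : Bool) : Prop := out = isTestBreak_alt line
instance (line : String) (out : Bool) : Decidable (Spec_isTestBreak line out) := by unfold Spec_isTestBreak; infer_instance

-- ===== CLAIM (what is proved, stated in full; the proofs are below) =====
def Claim_equal_isTestBreak : Prop := ∀ (line : String), Dom_isTestBreak line → Spec_isTestBreak line (isTestBreak line)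

-- ===== LEMMAS AND PROOFS =====

lemma pvCheckTests_eq_any (s : List Char) (ts : List String) :
    pvCheckTests s ts = ts.any (fun t => PySem.Chars.isIn t.toList s) := by
  induction ts with
  | nil => rfl
  | cons t ts ih => simp [pvCheckTests, ih]

lemma pv_infix_iff_bounded_drop (sub s : List Char) :
    sub <:+: s ↔ ∃ j ≤ s.length, sub <+: s.drop j := by
  rw [← PySem.Chars.isIn_iff_infix, ← PySem.Chars.exists_prefix_drop_iff_isIn]
  constructor
  · rintro ⟨j, hj⟩
    refine ⟨min j s.length, Nat.min_le_right _ _, ?_⟩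
    rcases Nat.le_total j s.length with h | h
    · simpa [Nat.min_eq_left h] using hj
    · have hnil : s.drop j = [] := List.drop_eq_nil_of_le h
      have : sub <+: ([] : List Char) := hnil ▸ hj
      have hsub : sub = [] := List.prefix_nil.mp this
      simp [hsub]
  · rintro ⟨j, _, hj⟩; exact ⟨j, hj⟩

-- ===== VERDICT (by name: the statement is the Claim_ definition above) =====
theorem isTestBreak_spec : Claim_equal_isTestBreak := by
  intro line _
  unfold Spec_isTestBreak isTestBreak isTestBreak_alt
  set s := PySem.Chars.replace line.toList "--check".toList [] with hs
  rw [pvCheckTests_eq_any, Bool.eq_iff_iff]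
  simp only [List.any_eq_true, PySem.Chars.isIn_iff_infix, PySem.List.mem_pyRange_one,
    PySem.Chars.startswith_iff, PySem.Chars.slice_eq_listSlice, pvTestsA, pvTestsA]
  constructor
  · rintro ⟨t, ht, hinf⟩
    rcases (pv_infix_iff_bounded_drop _ _).mp hinf with ⟨j, hjle, hpref⟩
    refine ⟨(j : Int), ⟨by omega, by omega⟩, t, ht, ?_⟩
    rwa [PySem.List.slice_from s (by omega), Int.toNat_natCast]
  · rintro ⟨i, ⟨hi0, _⟩, t, ht, hpref⟩
    rw [PySem.List.slice_from s hi0] at hpref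
    exact ⟨t, ht, (pv_infix_iff_bounded_drop _ _).mpr
      ⟨min i.toNat s.length, Nat.min_le_right _ _, by
        rcases Nat.le_total i.toNat s.length with h | h
        · simpa [Nat.min_eq_left h] using hpref
        · have hnil : s.drop i.toNat = [] := List.drop_eq_nil_of_le h
          have hsub : t.toList = [] := List.prefix_nil.mp (hnil ▸ hpref)
          simp [hsub]⟩⟩
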